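-- pv_equiv track=rewrite | github.com/aparjadis/Hanalog_MOPTA2022 | Python/solve_week.py | costs_Emergency
-- ===== SOURCE A (Python) =====
-- specialties_mean = [99,132,78,75,142,72]
--
-- emergency_mean = 120
--
-- C_WAITING = 2 #cost of waiting for an OR, per minute
--
-- C_OVERTIME = 5 #cost of working overtime, per minute
--
-- C_IDLE = 1 #cost of waiting for a surgery, per minute
--
-- def costs_noEmergency(s,t,l):
--
--     id_c, wa_c, ov_c = 0,0,0
--     T = [t[i] for i in range(l)]
--     dur = [specialties_mean[s] for i in range(l)]
--     for i in range(len(T)-1):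
--
--         if T[i]+dur[i] > T[i+1]:
--             wa_c += (T[i]+dur[i]-T[i+1])*C_WAITING
--         elif T[i]+dur[i] < T[i+1]:
--             id_c += (T[i+1]-(T[i]+dur[i]))*C_IDLE
--         T[i+1] = max(T[i+1],T[i]+dur[i])
--
--     if l > 0:
--         if T[-1]+specialties_mean[s] > 60*8:
--             ov_c += (T[-1]+dur[-1]-60*8)*C_OVERTIME
--         else:
--             id_c += (60*8-(T[-1]+dur[-1]))*C_IDLE
--     else:
--         return (60*8)*C_IDLE,wa_c,ov_c
--
--     return id_c,wa_c,ov_c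
--
-- def costs_Emergency(s,t,l,m,added_m):#m spots reserved, added_m spots actually used
--
--     if added_m == 0:
--         return costs_noEmergency(s,t,l)
--
--     id_c, wa_c, ov_c = 0,0,0
--
--     if added_m <= m:
--         T = t[:l+added_m]
--         dur = [specialties_mean[s] for i in range(l)]+[emergency_mean for i in range(added_m)]
--     else:
--         T = t.copy()
--         dur = [specialties_mean[s] for i in range(l)]+[emergency_mean for i in range(m)]
--         for i in range(added_m-m):
--             dur.append(emergency_mean)
--             T.append(T[-1]+emergency_mean)
--
--     for i in range(len(T)-1):
--
--         if T[i]+dur[i] > T[i+1]: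
--             wa_c += (T[i]+dur[i]-T[i+1])*C_WAITING
--         elif T[i]+dur[i] < T[i+1]:
--             id_c += (T[i+1]-(T[i]+dur[i]))*C_IDLE
--         T[i+1] = max(T[i+1],T[i]+dur[i])
--
--
--     if T[-1]+dur[-1] > 60*8:
--         ov_c += (T[-1]+dur[-1]-60*8)*C_OVERTIME
--     else:
--         id_c += (60*8-(T[-1]+dur[-1]))*C_IDLE
--
--     return id_c,wa_c,ov_c
-- ===== SOURCE B (Python) =====
-- specialties_mean = [99,132,78,75,142,72]
--
-- emergency_mean = 120
--
-- C_WAITING = 2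
-- C_OVERTIME = 5
-- C_IDLE = 1
--
-- def _spec_block(s, l):
--     # l surgery durations of the chosen specialty (no index access when l <= 0)
--     return [specialties_mean[s]] * l if l > 0 else []
--
-- def _pass_costs(T, dur):
--     # pass 1: effective start times
--     E = [T[0]]
--     for i in range(1, len(T)):
--         E.append(max(T[i], E[-1] + dur[i - 1]))
--     # pass 2: compare each completion with the originally scheduled next start
--     comps = [E[i] + dur[i] for i in range(len(T) - 1)]
--     wa_c = C_WAITING * sum(c - nxt for c, nxt in zip(comps, T[1:]) if c > nxt)
--     id_c = C_IDLE * sum(nxt - c for c, nxt in zip(comps, T[1:]) if c < nxt)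
--     last = E[-1] + dur[-1]
--     if last > 480:
--         return id_c, wa_c, C_OVERTIME * (last - 480)
--     return id_c + C_IDLE * (480 - last), wa_c, 0
--
-- def costs_Emergency(s, t, l, m, added_m):
--     if added_m == 0:
--         if l <= 0:
--             return 480 * C_IDLE, 0, 0
--         return _pass_costs(t[:l], _spec_block(s, l))
--     if added_m <= m:
--         T = t[:l + added_m]
--         dur = _spec_block(s, l) + [emergency_mean] * added_m
--     else:
--         extra = added_m - m
--         T = t + [t[-1] + emergency_mean * (k + 1) for k in range(extra)]
--         dur = _spec_block(s, l) + [emergency_mean] * (max(m, 0) + extra)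
--     return _pass_costs(T, dur)
-- ===== Notes on version B (the rewrite author's own statement) =====
-- stated objective: alternative
-- what changed: A's single fused loop that mutates T in place while accumulating waiting/idle costs is replaced by two separate passes (first build the effective-start table E, then sum the per-surgery waiting/idle penalties by zipping completions with the originally scheduled starts), and the iterative append loop of the added_m>m branch is replaced by a closed-form list extension t[-1]+emergency_mean*(k+1).
import Mathlib
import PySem

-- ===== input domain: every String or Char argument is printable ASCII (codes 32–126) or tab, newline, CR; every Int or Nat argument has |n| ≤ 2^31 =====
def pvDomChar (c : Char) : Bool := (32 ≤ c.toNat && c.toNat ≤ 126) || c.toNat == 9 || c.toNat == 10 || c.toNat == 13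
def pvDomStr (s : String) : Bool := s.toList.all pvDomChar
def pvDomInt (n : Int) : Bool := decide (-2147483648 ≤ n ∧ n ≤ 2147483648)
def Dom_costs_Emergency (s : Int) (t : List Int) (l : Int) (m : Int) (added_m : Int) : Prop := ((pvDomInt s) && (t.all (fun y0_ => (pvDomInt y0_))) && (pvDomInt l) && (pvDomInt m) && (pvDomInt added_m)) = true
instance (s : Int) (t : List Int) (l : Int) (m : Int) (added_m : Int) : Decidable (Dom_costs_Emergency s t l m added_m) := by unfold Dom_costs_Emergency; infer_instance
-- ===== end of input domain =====

-- B re-decomposes A's fused mutating loop into two passes (effective starts, then cost sums)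
-- and replaces the iterative append loop by a closed-form extension; objective: alternative
-- decomposition (same cost). Equivalence is about the return value on Pre_ (where the Python A
-- returns without raising).

-- ===== PORT A =====
def specialties_mean : List Int := [99, 132, 78, 75, 142, 72]
def emergency_mean : Int := 120
def C_WAITING : Int := 2
def C_OVERTIME : Int := 5
def C_IDLE : Int := 1

-- the loop body 'for i in range(len(T)-1): …' (textually identical in both Python functions);
-- state is (T, id_c, wa_c); the assignment T[i+1] = … is pySetD (index i+1 is in range under Pre_)
def stepA (dur : List Int) (st : List Int × Int × Int) (i : Int) : List Int × Int × Int :=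
  let comp := PySem.List.pyGetD st.1 i 0 + PySem.List.pyGetD dur i 0
  let nxt := PySem.List.pyGetD st.1 (i + 1) 0
  let wa_c := if comp > nxt then st.2.2 + (comp - nxt) * C_WAITING else st.2.2
  let id_c := if ¬ comp > nxt ∧ comp < nxt then st.2.1 + (nxt - comp) * C_IDLE else st.2.1
  (PySem.List.pySetD st.1 (i + 1) (max nxt comp), id_c, wa_c)

-- the loop plus the final overtime/idle block of costs_Emergency
def runA (T dur : List Int) : Int × Int × Int :=
  let st := (PySem.List.pyRange 0 ((PySem.List.len T) - 1) 1).foldl (stepA dur) (T, 0, 0)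
  let comp := PySem.List.pyGetD st.1 (-1) 0 + PySem.List.pyGetD dur (-1) 0
  if comp > 60 * 8 then (st.2.1, st.2.2, 0 + (comp - 60 * 8) * C_OVERTIME)
  else (st.2.1 + (60 * 8 - comp) * C_IDLE, st.2.2, 0)

def costs_noEmergency (s : Int) (t : List Int) (l : Int) : Int × Int × Int :=
  let T := (PySem.List.pyRange 0 l 1).map (fun i => PySem.List.pyGetD t i 0)
  let dur := (PySem.List.pyRange 0 l 1).map (fun _ => PySem.List.pyGetD specialties_mean s 0)
  let st := (PySem.List.pyRange 0 ((PySem.List.len T) - 1) 1).foldl (stepA dur) (T, 0, 0)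
  if l > 0 then
    let comp := PySem.List.pyGetD st.1 (-1) 0 + PySem.List.pyGetD dur (-1) 0
    if PySem.List.pyGetD st.1 (-1) 0 + PySem.List.pyGetD specialties_mean s 0 > 60 * 8 then
      (st.2.1, st.2.2, 0 + (comp - 60 * 8) * C_OVERTIME)
    else (st.2.1 + (60 * 8 - comp) * C_IDLE, st.2.2, 0)
  else (60 * 8 * C_IDLE, st.2.2, 0)

def costs_Emergency (s : Int) (t : List Int) (l : Int) (m : Int) (added_m : Int) : Int × Int × Int :=
  if added_m = 0 then costs_noEmergency s t l
  else if added_m ≤ m then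
    let T := PySem.List.slice t none (some (l + added_m))
    let dur := (PySem.List.pyRange 0 l 1).map (fun _ => PySem.List.pyGetD specialties_mean s 0)
      ++ (PySem.List.pyRange 0 added_m 1).map (fun _ => emergency_mean)
    runA T dur
  else
    -- T = t.copy(); loop appending to dur and T
    let p := (PySem.List.pyRange 0 (added_m - m) 1).foldl
      (fun (p : List Int × List Int) _ =>
        (p.1 ++ [PySem.List.pyGetD p.1 (-1) 0 + emergency_mean], p.2 ++ [emergency_mean]))
      (t, (PySem.List.pyRange 0 l 1).map (fun _ => PySem.List.pyGetD specialties_mean s 0)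
          ++ (PySem.List.pyRange 0 m 1).map (fun _ => emergency_mean))
    runA p.1 p.2

-- ===== PORT B =====
-- l surgery durations of the chosen specialty (no index access when l <= 0)
def spec_block (s l : Int) : List Int :=
  if l > 0 then List.replicate l.toNat (PySem.List.pyGetD specialties_mean s 0) else []

def pass_costs (T dur : List Int) : Int × Int × Int :=
  -- pass 1: effective start times
  let E := (PySem.List.pyRange 1 (PySem.List.len T) 1).foldl
    (fun E i => E ++ [max (PySem.List.pyGetD T i 0)
      (PySem.List.pyGetD E (-1) 0 + PySem.List.pyGetD dur (i - 1) 0)])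
    [PySem.List.pyGetD T 0 0]
  -- pass 2: compare each completion with the originally scheduled next start
  let comps := (PySem.List.pyRange 0 ((PySem.List.len T) - 1) 1).map
    (fun i => PySem.List.pyGetD E i 0 + PySem.List.pyGetD dur i 0)
  let pairs := comps.zip (PySem.List.slice T (some 1) none)
  let wa_c := C_WAITING * ((pairs.filter (fun p => p.1 > p.2)).map (fun p => p.1 - p.2)).sum
  let id_c := C_IDLE * ((pairs.filter (fun p => p.1 < p.2)).map (fun p => p.2 - p.1)).sum
  let last := PySem.List.pyGetD E (-1) 0 + PySem.List.pyGetD dur (-1) 0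
  if last > 480 then (id_c, wa_c, C_OVERTIME * (last - 480))
  else (id_c + C_IDLE * (480 - last), wa_c, 0)

def costs_Emergency_alt (s : Int) (t : List Int) (l : Int) (m : Int) (added_m : Int) : Int × Int × Int :=
  if added_m = 0 then
    if l ≤ 0 then (480 * C_IDLE, 0, 0)
    else pass_costs (PySem.List.slice t none (some l)) (spec_block s l)
  else if added_m ≤ m then
    pass_costs (PySem.List.slice t none (some (l + added_m)))
      (spec_block s l ++ List.replicate added_m.toNat emergency_mean)
  else
    let extra := added_m - m
    pass_costs
      (t ++ (PySem.List.pyRange 0 extra 1).map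
        (fun k => PySem.List.pyGetD t (-1) 0 + emergency_mean * (k + 1)))
      (spec_block s l ++ List.replicate (max m 0 + extra).toNat emergency_mean)

-- ===== PRECONDITION & SPEC =====
-- Pre_ is exactly the set of inputs on which the Python A returns normally: the specialty index
-- must be in range when l > 0, the schedule/duration lists built by the chosen branch must be
-- non-empty, and the duration list must cover every index the loop and the final block read
-- (otherwise Python raises IndexError; A raises and is matched nowhere else).
def Pre_costs_Emergency (s : Int) (t : List Int) (l : Int) (m : Int) (added_m : Int) : Prop :=
  let n : Int := t.length
  let vs := -6 ≤ s ∧ s < 6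
  if added_m = 0 then l ≤ 0 ∨ (l ≤ n ∧ vs)
  else if added_m ≤ m then
    let lenT := min (max (if 0 ≤ l + added_m then l + added_m else n + (l + added_m)) 0) n
    let lenD := max l 0 + max added_m 0
    (l ≤ 0 ∨ vs) ∧ 1 ≤ lenT ∧ 1 ≤ lenD ∧ lenT - 1 ≤ lenD
  else (l ≤ 0 ∨ vs) ∧ 1 ≤ n ∧ n - 1 ≤ max l 0 + max m 0

instance (s : Int) (t : List Int) (l : Int) (m : Int) (added_m : Int) : Decidable (Pre_costs_Emergency s t l m added_m) := by unfold Pre_costs_Emergency; infer_instance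

def pvWitness_costs_Emergency : Int × List Int × Int × Int × Int := (2, [30, 200, 350], 2, 1, 1)

def Spec_costs_Emergency (s : Int) (t : List Int) (l : Int) (m : Int) (added_m : Int) (out : Int × Int × Int) : Prop := out = costs_Emergency_alt s t l m added_m
instance (s : Int) (t : List Int) (l : Int) (m : Int) (added_m : Int) (out : Int × Int × Int) : Decidable (Spec_costs_Emergency s t l m added_m out) := by unfold Spec_costs_Emergency; infer_instance

-- ===== CLAIM (what is proved, stated in full; the proofs are below) =====
def Claim_equal_costs_Emergency : Prop := ∀ (s : Int) (t : List Int) (l : Int) (m : Int) (added_m : Int), Dom_costs_Emergency s t l m added_m → Pre_costs_Emergency s t l m added_m → Spec_costs_Emergency s t l m added_m (costs_Emergency s t l m added_m)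

-- ===== LEMMAS AND PROOFS =====

-- effective start times, as a recursive function of the index
def Ef (T dur : List Int) : Nat → Int
  | 0 => T.getD 0 0
  | i + 1 => max (T.getD (i + 1) 0) (Ef T dur i + dur.getD i 0)

-- invariant of A's fused mutating loop
theorem loopA_inv (T dur : List Int) (k : Nat) (hk : k + 1 ≤ T.length) :
    (PySem.List.pyRange 0 (k : Int) 1).foldl (stepA dur) (T, 0, 0) =
      ((List.range T.length).map (fun j => if j ≤ k then Ef T dur j else T.getD j 0),
       ((List.range k).map (fun i =>
          if Ef T dur i + dur.getD i 0 < T.getD (i + 1) 0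
          then (T.getD (i + 1) 0 - (Ef T dur i + dur.getD i 0)) * C_IDLE else 0)).sum,
       ((List.range k).map (fun i =>
          if Ef T dur i + dur.getD i 0 > T.getD (i + 1) 0
          then (Ef T dur i + dur.getD i 0 - T.getD (i + 1) 0) * C_WAITING else 0)).sum) := by
  induction k with
  | zero =>
    rw [show ((0:Nat):Int) = 0 by norm_num, PySem.List.pyRange_one_eq_nil (by omega)]
    simp only [List.foldl_nil, List.range_zero, List.map_nil, List.sum_nil]
    refine Prod.ext ?_ rfl
    simp only
    apply List.ext_getElem (by simp)
    intro i h1 h2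
    simp only [List.getElem_map, List.getElem_range]
    rcases Nat.eq_zero_or_pos i with h | h
    · subst h; simp [Ef, List.getD_eq_getElem?_getD, List.getElem?_eq_getElem h1]
    · rw [if_neg (by omega)]
      simp [List.getD_eq_getElem?_getD, List.getElem?_eq_getElem h1]
  | succ k ih =>
    rw [show ((k+1:Nat):Int) = (k:Int) + 1 by push_cast; ring,
        PySem.List.pyRange_one_succ_right (by omega), List.foldl_append]
    rw [ih (by omega)]
    simp only [List.foldl_cons, List.foldl_nil]
    have hkT : k < T.length := by omega
    have hk1T : k + 1 < T.length ∨ k + 1 = T.length := by omega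
    -- we only use k + 1 ≤ T.length, i.e. k+1 < length since hk : k+2? no: hk : (k+1)+1 ≤ len
    have hk1 : k + 1 < T.length := by omega
    unfold stepA
    simp only [PySem.List.pyGetD_natCast,
      show ((k:Int) + 1) = ((k+1:Nat):Int) by push_cast; ring, PySem.List.pySetD_natCast]
    rw [PySem.List.getD_map_range (h := hkT), PySem.List.getD_map_range (h := hk1)]
    rw [if_pos (le_refl k), if_neg (by omega)]
    refine Prod.ext ?_ (Prod.ext ?_ ?_)
    · simp only
      apply List.ext_getElem (by simp)
      intro i h1 h2
      simp only [List.getElem_set, List.getElem_map, List.getElem_range]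
      by_cases hi : i = k + 1
      · subst hi
        rw [if_pos rfl, if_pos (by omega)]  -- placeholder
        simp [Ef]
      · rw [if_neg (by omega : ¬ k + 1 = i)]
        by_cases hik : i ≤ k
        · rw [if_pos hik, if_pos (by omega)]
        · rw [if_neg hik, if_neg (by omega)]
    · simp only [List.range_succ, List.map_append, List.sum_append, List.map_cons,
        List.map_nil, List.sum_cons, List.sum_nil, add_zero]
      by_cases h : Ef T dur k + dur.getD k 0 < T.getD (k + 1) 0
      · rw [if_pos h, if_pos (by constructor <;> omega)]
      · rw [if_neg h, if_neg (by intro ⟨_, h2⟩; exact h h2)]; ring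
    · simp only [List.range_succ, List.map_append, List.sum_append, List.map_cons,
        List.map_nil, List.sum_cons, List.sum_nil, add_zero]
      split_ifs <;> ring

-- B's first pass builds exactly the table of effective start times
theorem passB_inv (T dur : List Int) (k : Nat) (hk : k + 1 ≤ T.length) :
    (PySem.List.pyRange 1 (1 + (k : Int)) 1).foldl
      (fun E i => E ++ [max (PySem.List.pyGetD T i 0)
        (PySem.List.pyGetD E (-1) 0 + PySem.List.pyGetD dur (i - 1) 0)])
      [PySem.List.pyGetD T 0 0] =
      (List.range (k + 1)).map (Ef T dur) := by
  induction k with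
  | zero =>
    rw [PySem.List.pyRange_one_eq_nil (by norm_num)]
    simp [PySem.List.pyGetD_zero, Ef]
  | succ k ih =>
    have h1 : (1 : Int) + ((k : Nat) + 1 : Nat) = (1 + (k : Int)) + 1 := by push_cast; ring
    rw [h1, PySem.List.pyRange_one_succ_right (by omega), List.foldl_append]
    rw [ih (by omega)]
    have hsplit : (List.range (k + 1)).map (Ef T dur)
        = (List.range k).map (Ef T dur) ++ [Ef T dur k] := by
      rw [List.range_succ, List.map_append]; rfl
    simp only [List.foldl_cons, List.foldl_nil]
    rw [hsplit, PySem.List.pyGetD_neg_one_append_singleton]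
    have h2 : (1 : Int) + (k : Int) = ((k + 1 : Nat) : Int) := by omega
    rw [h2]
    rw [show ((k+1:Nat):Int) - 1 = ((k:Nat):Int) by omega]
    simp only [PySem.List.pyGetD_natCast]
    rw [List.range_succ, List.range_succ, List.map_append, List.map_append]
    simp [Ef]

theorem filtersum (ps : List (Int × Int)) (p : Int × Int → Bool) (f : Int × Int → Int) :
    ((ps.filter p).map f).sum = (ps.map (fun x => if p x then f x else 0)).sum := by
  induction ps with
  | nil => rfl
  | cons a l ih =>
    simp only [List.filter_cons, List.map_cons, List.sum_cons]
    by_cases h : p a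
    · simp [h, ih]
    · simp [h, ih]

theorem zip_map_range (c : Nat → Int) (xs : List Int) :
    ((List.range xs.length).map c).zip xs
      = (List.range xs.length).map (fun i => (c i, xs.getD i 0)) := by
  apply List.ext_getElem (by simp)
  intro i h1 h2
  simp only [List.getElem_zip, List.getElem_map, List.getElem_range]
  simp only [List.length_map, List.length_range] at *
  rw [List.getD_eq_getElem?_getD, List.getElem?_eq_getElem (by simpa using h2)]
  rfl

-- A's loop + final block equals B's two passes, for every T and dur
theorem runA_eq_pass_costs (T dur : List Int) : runA T dur = pass_costs T dur := by
  rcases T with _ | ⟨x, xs⟩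
  · simp only [runA, pass_costs, PySem.List.len_eq, List.length_nil, Nat.cast_zero]
    rw [PySem.List.pyRange_one_eq_nil (by norm_num : (0:Int) - 1 ≤ 0),
        PySem.List.pyRange_one_eq_nil (by norm_num : (0:Int) ≤ 1)]
    simp [PySem.List.slice, PySem.List.pyGetD, PySem.List.pyGet?, PySem.List.pyIdx?, C_IDLE, C_OVERTIME]
    split_ifs <;> first | rfl | exact Prod.ext rfl (Prod.ext rfl (by ring))
  · set T := x :: xs with hTdef
    have hn : T.length = xs.length + 1 := by simp [hTdef]
    have hcast2 : (PySem.List.len T) = 1 + ((xs.length : Nat) : Int) := by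
      simp [PySem.List.len_eq, hn]; ring
    have e1 := loopA_inv T dur xs.length (by omega)
    have e2 := passB_inv T dur xs.length (by omega)
    have h0 : (1:Int) + (xs.length : Int) - 1 = ((xs.length : Nat) : Int) := by ring
    simp only [runA, pass_costs, hcast2, h0, e1, e2]
    have hTfin : (List.range T.length).map (fun j => if j ≤ xs.length then Ef T dur j else T.getD j 0)
        = (List.range (xs.length + 1)).map (Ef T dur) := by
      rw [hn]; exact List.map_congr_left (fun j hj => if_pos (by simp at hj; omega))
    rw [hTfin]
    have hlast : PySem.List.pyGetD ((List.range (xs.length + 1)).map (Ef T dur)) (-1) 0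
        = Ef T dur xs.length := by
      rw [List.range_succ, List.map_append, List.map_cons, List.map_nil]
      exact PySem.List.pyGetD_neg_one_append_singleton _ _ _
    rw [hlast]
    have hcomps : (PySem.List.pyRange 0 ((xs.length : Nat) : Int) 1).map
        (fun i => PySem.List.pyGetD ((List.range (xs.length + 1)).map (Ef T dur)) i 0
          + PySem.List.pyGetD dur i 0)
        = (List.range xs.length).map (fun k => Ef T dur k + dur.getD k 0) := by
      rw [PySem.List.pyRange_zero_nat, List.map_map]
      refine List.map_congr_left (fun k hk => ?_)
      simp only [Function.comp_apply, PySem.List.pyGetD_natCast]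
      rw [PySem.List.getD_map_range (h := by simp at hk; omega)]
    have hslice : PySem.List.slice T (some 1) none = xs := by
      rw [PySem.List.slice_from_one]; rfl
    rw [hcomps, hslice, zip_map_range, filtersum, filtersum, List.map_map, List.map_map]
    have hgetD : ∀ i : Nat, xs.getD i 0 = T.getD (i + 1) 0 := fun i => rfl
    -- normalize B's filtered sums
    have hBid : ((List.range xs.length).map
          ((fun x => if (decide (x.1 < x.2)) = true then x.2 - x.1 else 0)
            ∘ fun i => (Ef T dur i + dur.getD i 0, xs.getD i 0))).sum
        = ((List.range xs.length).map (fun i =>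
            if Ef T dur i + dur.getD i 0 < T.getD (i + 1) 0
            then T.getD (i + 1) 0 - (Ef T dur i + dur.getD i 0) else 0)).sum := by
      refine congrArg List.sum (List.map_congr_left (fun k _ => ?_))
      simp only [Function.comp_apply, decide_eq_true_eq, hgetD]
    have hBwa : ((List.range xs.length).map
          ((fun x => if (decide (x.1 > x.2)) = true then x.1 - x.2 else 0)
            ∘ fun i => (Ef T dur i + dur.getD i 0, xs.getD i 0))).sum
        = ((List.range xs.length).map (fun i =>
            if Ef T dur i + dur.getD i 0 > T.getD (i + 1) 0
            then Ef T dur i + dur.getD i 0 - T.getD (i + 1) 0 else 0)).sum := by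
      refine congrArg List.sum (List.map_congr_left (fun k _ => ?_))
      simp only [Function.comp_apply, decide_eq_true_eq, hgetD]
    rw [hBid, hBwa]
    -- normalize A's sums: pull the cost constants out
    have hAid : ((List.range xs.length).map (fun i =>
          if Ef T dur i + dur.getD i 0 < T.getD (i + 1) 0
          then (T.getD (i + 1) 0 - (Ef T dur i + dur.getD i 0)) * C_IDLE else 0)).sum
        = C_IDLE * ((List.range xs.length).map (fun i =>
            if Ef T dur i + dur.getD i 0 < T.getD (i + 1) 0
            then T.getD (i + 1) 0 - (Ef T dur i + dur.getD i 0) else 0)).sum := by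
      rw [← List.sum_map_mul_left]
      refine congrArg List.sum (List.map_congr_left (fun k _ => ?_))
      split_ifs <;> ring
    have hAwa : ((List.range xs.length).map (fun i =>
          if Ef T dur i + dur.getD i 0 > T.getD (i + 1) 0
          then (Ef T dur i + dur.getD i 0 - T.getD (i + 1) 0) * C_WAITING else 0)).sum
        = C_WAITING * ((List.range xs.length).map (fun i =>
            if Ef T dur i + dur.getD i 0 > T.getD (i + 1) 0
            then Ef T dur i + dur.getD i 0 - T.getD (i + 1) 0 else 0)).sum := by
      rw [← List.sum_map_mul_left]
      refine congrArg List.sum (List.map_congr_left (fun k _ => ?_))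
      split_ifs <;> ring
    rw [hAid, hAwa, show (60:Int) * 8 = 480 from by norm_num]
    split_ifs with hc
    · exact Prod.ext rfl (Prod.ext rfl (by ring))
    · exact Prod.ext (by ring) (Prod.ext rfl rfl)

-- turning a range-comprehension over t into a take
theorem map_range_getD_take (t : List Int) (k : Nat) (hk : k ≤ t.length) :
    (List.range k).map (fun i => t.getD i 0) = t.take k := by
  apply List.ext_getElem (by simp; omega)
  intro i h1 h2
  simp only [List.getElem_map, List.getElem_range, List.getElem_take]
  simp only [List.length_map, List.length_range] at h1
  rw [List.getD_eq_getElem?_getD, List.getElem?_eq_getElem (by omega)]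
  rfl

theorem pyRange_map_getD (t : List Int) (l : Int) (hl : l ≤ (t.length : Int)) :
    (PySem.List.pyRange 0 l 1).map (fun i => PySem.List.pyGetD t i 0) = t.take l.toNat := by
  by_cases h : l ≤ 0
  · rw [PySem.List.pyRange_one_eq_nil h, List.map_nil,
      show l.toNat = 0 by omega, List.take_zero]
  · rw [show l = ((l.toNat : Nat) : Int) by omega, PySem.List.pyRange_zero_nat, List.map_map]
    rw [show ((fun i => PySem.List.pyGetD t i 0) ∘ fun k : Nat => (k : Int))
        = fun i : Nat => t.getD i 0 by funext i; simp]
    exact map_range_getD_take t l.toNat (by omega)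

theorem pyRange_map_const (c l : Int) :
    (PySem.List.pyRange 0 l 1).map (fun _ => c) = List.replicate l.toNat c := by
  apply List.eq_replicate_iff.mpr
  constructor
  · simp [PySem.List.length_pyRange_one]
  · intro b hb; simp at hb; exact hb.2

-- costs_noEmergency for l > 0 is runA (its final comparison reads the same specialty duration)
theorem noEmergency_eq (s : Int) (t : List Int) (l : Int) (hl : 0 < l) :
    costs_noEmergency s t l
      = runA ((PySem.List.pyRange 0 l 1).map (fun i => PySem.List.pyGetD t i 0))
          ((PySem.List.pyRange 0 l 1).map (fun _ => PySem.List.pyGetD specialties_mean s 0)) := by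
  unfold costs_noEmergency runA
  rw [if_pos hl, pyRange_map_const]
  have hdur : PySem.List.pyGetD
      (List.replicate l.toNat (PySem.List.pyGetD specialties_mean s 0)) (-1) 0
      = PySem.List.pyGetD specialties_mean s 0 := by
    rw [PySem.List.pyGetD_neg_one (h := by
      intro hnil
      have := congrArg List.length hnil
      rw [List.length_replicate] at this
      simp only [List.length_nil] at this
      omega)]
    exact List.getLast_replicate _
  refine if_congr ?_ rfl rfl
  rw [hdur]

-- the append loop of the added_m > m branch, in closed form
theorem appendLoop (t d0 : List Int) (e : Nat) :
    (PySem.List.pyRange 0 (e : Int) 1).foldl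
      (fun (p : List Int × List Int) _ =>
        (p.1 ++ [PySem.List.pyGetD p.1 (-1) 0 + emergency_mean], p.2 ++ [emergency_mean]))
      (t, d0)
    = (t ++ (PySem.List.pyRange 0 (e : Int) 1).map
        (fun k => PySem.List.pyGetD t (-1) 0 + emergency_mean * (k + 1)),
       d0 ++ List.replicate e emergency_mean)
    ∧ PySem.List.pyGetD (t ++ (PySem.List.pyRange 0 (e : Int) 1).map
        (fun k => PySem.List.pyGetD t (-1) 0 + emergency_mean * (k + 1))) (-1) 0
      = PySem.List.pyGetD t (-1) 0 + emergency_mean * e := by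
  induction e with
  | zero =>
    rw [show ((0:Nat):Int) = 0 by norm_num, PySem.List.pyRange_one_eq_nil (by omega)]
    simp
  | succ e ih =>
    rw [show ((e+1:Nat):Int) = (e:Int) + 1 by push_cast; ring,
        PySem.List.pyRange_one_succ_right (by omega), List.foldl_append, List.map_append,
        List.foldl_cons, List.foldl_nil, ih.1]
    simp only [List.map_cons, List.map_nil]
    rw [ih.2]
    constructor
    · refine Prod.ext ?_ ?_
      · simp only [List.append_assoc]
        have hx : PySem.List.pyGetD t (-1) 0 + emergency_mean * (e:Int) + emergency_mean
            = PySem.List.pyGetD t (-1) 0 + emergency_mean * ((e:Int) + 1) := by ring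
        rw [hx]
      · simp only [List.append_assoc, ← List.replicate_succ']
    · rw [← List.append_assoc, PySem.List.pyGetD_neg_one_append_singleton]

theorem spec_block_eq (s l : Int) :
    spec_block s l = List.replicate l.toNat (PySem.List.pyGetD specialties_mean s 0) := by
  unfold spec_block
  split_ifs with h
  · rfl
  · rw [show l.toNat = 0 by omega]; rfl

-- ===== VERDICT (by name: the statement is the Claim_ definition above) =====
theorem costs_Emergency_spec : Claim_equal_costs_Emergency := by
  intro s t l m am hdom hpre
  unfold Spec_costs_Emergency costs_Emergency costs_Emergency_alt
  unfold Pre_costs_Emergency at hpre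
  simp only [] at hpre
  by_cases h0 : am = 0
  · rw [if_pos h0, if_pos h0]
    rw [if_pos h0] at hpre
    by_cases hl : l ≤ 0
    · rw [if_pos hl]
      unfold costs_noEmergency
      rw [PySem.List.pyRange_one_eq_nil hl]
      simp only [List.map_nil, PySem.List.len_eq, List.length_nil, Nat.cast_zero]
      rw [PySem.List.pyRange_one_eq_nil (by norm_num : (0:Int) - 1 ≤ 0)]
      rw [if_neg (by omega : ¬ l > 0)]
      norm_num [C_IDLE]
    · have hl' : 0 < l := by omega
      obtain ⟨hln, hvs⟩ := hpre.resolve_left hl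
      rw [if_neg hl]
      rw [noEmergency_eq s t l hl', runA_eq_pass_costs]
      rw [pyRange_map_getD t l hln, pyRange_map_const]
      rw [show PySem.List.slice t none (some l) = t.take l.toNat by
            rw [show l = ((l.toNat : Nat) : Int) by omega, PySem.List.slice_to_natCast,
               show ((l.toNat : Nat) : Int).toNat = l.toNat by omega],
          spec_block_eq]
  · rw [if_neg h0, if_neg h0]
    rw [if_neg h0] at hpre
    by_cases hm : am ≤ m
    · rw [if_pos hm, if_pos hm]
      rw [runA_eq_pass_costs, pyRange_map_const, pyRange_map_const, spec_block_eq]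
    · rw [if_neg hm, if_neg hm]
      rw [if_neg hm] at hpre
      simp only [Int.reduceNeg]
      have he : am - m = (((am - m).toNat : Nat) : Int) := by omega
      rw [he, (appendLoop t _ ((am - m).toNat)).1, runA_eq_pass_costs]
      rw [pyRange_map_const, pyRange_map_const, spec_block_eq]
      rw [show (max m 0 + (((am - m).toNat : Nat) : Int)).toNat
            = m.toNat + (am - m).toNat by omega]
      rw [List.replicate_add, List.append_assoc]
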